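-- pv_equiv track=rewrite | github.com/dongyifeng/dyf_py | zuo_shen/刷题/array_demo/up_median.py | get_up_median2
-- ===== SOURCE A (Python) =====
-- def get_up_median2(arr1, arr2):
--     if not arr1 or not arr2 or len(arr1) != len(arr2): return
--
--     data = []
--
--     for item in arr1:
--         data.append(item)
--
--     for item in arr2:
--         data.append(item)
--     mid = int(len(data) / 2) - 1
--     data = sorted(data)
--     return data[mid]
-- ===== SOURCE B (Python) =====
-- def get_up_median2(arr1, arr2):
--     if not arr1 or not arr2 or len(arr1) != len(arr2):
--         return None
--     # Sort each half separately, then two-pointer discard the n-1 smallest of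
--     # the merged order; the next element (the n-th smallest = lower-middle of 2n)
--     # is min(a[i], b[j]).  Neither pointer can run off its array: at most n-1
--     # elements are discarded in total.
--     a = sorted(arr1)
--     b = sorted(arr2)
--     i = j = 0
--     for _ in range(len(arr1) - 1):
--         if a[i] <= b[j]:
--             i += 1
--         else:
--             j += 1
--     return min(a[i], b[j])
-- ===== Notes on version B (the rewrite author's own statement) =====
-- stated objective: alternative
-- what changed: Instead of concatenating both arrays, sorting the whole 2n-element list and indexing it at n-1, B sorts the two halves independently and runs an n-1-step two-pointer merge walk to reach the n-th smallest element directly, returning min(a[i], b[j]).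
import Mathlib
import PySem

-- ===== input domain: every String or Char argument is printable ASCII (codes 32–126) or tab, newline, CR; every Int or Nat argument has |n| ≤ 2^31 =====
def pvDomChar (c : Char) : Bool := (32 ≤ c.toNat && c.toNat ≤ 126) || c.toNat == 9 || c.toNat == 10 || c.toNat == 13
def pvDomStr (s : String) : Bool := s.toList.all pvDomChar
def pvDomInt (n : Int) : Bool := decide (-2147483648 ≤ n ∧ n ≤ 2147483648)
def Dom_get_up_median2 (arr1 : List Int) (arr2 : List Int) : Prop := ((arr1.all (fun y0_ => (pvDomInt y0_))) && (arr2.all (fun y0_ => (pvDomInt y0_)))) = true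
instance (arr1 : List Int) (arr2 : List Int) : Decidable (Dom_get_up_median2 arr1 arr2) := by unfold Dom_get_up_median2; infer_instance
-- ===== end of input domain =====

-- B replaces A's sort-the-concatenation-and-index by sorting the two halves and a two-pointer
-- merge walk to the n-th smallest element (objective: alternative algorithm, same asymptotic cost).

-- ===== PORT A =====
def get_up_median2 (arr1 : List Int) (arr2 : List Int) : Option Int :=
  if arr1 = [] ∨ arr2 = [] ∨ arr1.length ≠ arr2.length then none
  else
    let data := arr1.foldl (fun acc item => acc ++ [item]) ([] : List Int)
    let data := arr2.foldl (fun acc item => acc ++ [item]) data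
    -- int(len(data)/2): true division of the even length by 2 is float-exact, then int() truncates
    let mid : Int := PySem.Int.truncdiv (data.length : Int) 2 - 1
    let data := PySem.List.sorted data (fun x => x) false
    PySem.List.pyGet? data mid   -- index mid is always in range here, so this is the returned int

-- ===== PORT B =====
def get_up_median2_alt (arr1 : List Int) (arr2 : List Int) : Option Int :=
  if arr1 = [] ∨ arr2 = [] ∨ arr1.length ≠ arr2.length then none
  else
    let a := PySem.List.sorted arr1 (fun x => x) false
    let b := PySem.List.sorted arr2 (fun x => x) false
    let p := (List.range (arr1.length - 1)).foldl
      (fun (p : Nat × Nat) _ => if a.getD p.1 0 ≤ b.getD p.2 0 then (p.1 + 1, p.2) else (p.1, p.2 + 1))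
      (0, 0)
    some (min (a.getD p.1 0) (b.getD p.2 0))

-- ===== PRECONDITION & SPEC =====
def Spec_get_up_median2 (arr1 : List Int) (arr2 : List Int) (out : Option Int) : Prop := out = get_up_median2_alt arr1 arr2
instance (arr1 : List Int) (arr2 : List Int) (out : Option Int) : Decidable (Spec_get_up_median2 arr1 arr2 out) := by unfold Spec_get_up_median2; infer_instance

-- ===== CLAIM (what is proved, stated in full; the proofs are below) =====
def Claim_equal_get_up_median2 : Prop := ∀ (arr1 : List Int) (arr2 : List Int), Dom_get_up_median2 arr1 arr2 → Spec_get_up_median2 arr1 arr2 (get_up_median2 arr1 arr2)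

-- ===== LEMMAS AND PROOFS =====

/-- Proof-side merge of two lists (ties taken from the left list). -/
def pvMerge : List Int → List Int → List Int
  | [], ys => ys
  | x :: xs, [] => x :: xs
  | x :: xs, y :: ys => if x ≤ y then x :: pvMerge xs (y :: ys) else y :: pvMerge (x :: xs) ys

theorem pvMerge_perm : ∀ (xs ys : List Int), (pvMerge xs ys).Perm (xs ++ ys)
  | [], ys => by simp [pvMerge]
  | x :: xs, [] => by simp [pvMerge]
  | x :: xs, y :: ys => by
    by_cases h : x ≤ y
    · simpa [pvMerge, h] using (pvMerge_perm xs (y :: ys)).cons x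
    · have hrw : pvMerge (x :: xs) (y :: ys) = y :: pvMerge (x :: xs) ys := by simp [pvMerge, h]
      rw [hrw]
      exact ((pvMerge_perm (x :: xs) ys).cons y).trans
        (List.Perm.symm (List.perm_middle (a := y) (l₁ := x :: xs) (l₂ := ys)))

theorem pvMerge_pairwise : ∀ (xs ys : List Int), xs.Pairwise (· ≤ ·) → ys.Pairwise (· ≤ ·) →
    (pvMerge xs ys).Pairwise (· ≤ ·)
  | [], ys, _, hy => by simpa [pvMerge] using hy
  | x :: xs, [], hx, _ => by simpa [pvMerge] using hx
  | x :: xs, y :: ys, hx, hy => by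
    rcases List.pairwise_cons.mp hx with ⟨hxall, hx'⟩
    rcases List.pairwise_cons.mp hy with ⟨hyall, hy'⟩
    by_cases h : x ≤ y
    · simp only [pvMerge, h, if_pos]
      refine List.pairwise_cons.mpr ⟨?_, pvMerge_pairwise xs (y :: ys) hx' hy⟩
      intro z hz
      have hz' := (pvMerge_perm xs (y :: ys)).mem_iff.mp hz
      rcases List.mem_append.mp hz' with hzl | hzr
      · exact hxall z hzl
      · rcases List.mem_cons.mp hzr with rfl | hzr'
        · exact h
        · exact le_trans h (hyall z hzr')
    · simp only [pvMerge, h, if_neg, not_false_iff]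
      refine List.pairwise_cons.mpr ⟨?_, pvMerge_pairwise (x :: xs) ys hx hy'⟩
      intro z hz
      have hz' := (pvMerge_perm (x :: xs) ys).mem_iff.mp hz
      have hyx : y ≤ x := le_of_not_ge h
      rcases List.mem_append.mp hz' with hzl | hzr
      · rcases List.mem_cons.mp hzl with rfl | hzl'
        · exact hyx
        · exact le_trans hyx (hxall z hzl')
      · exact hyall z hzr

/-- Proof-side recursion computing the same pointer pair as B's fold. -/
def pvIter (a b : List Int) : Nat → Nat × Nat
  | 0 => (0, 0)
  | t + 1 =>
    let p := pvIter a b t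
    if a.getD p.1 0 ≤ b.getD p.2 0 then (p.1 + 1, p.2) else (p.1, p.2 + 1)

theorem foldl_range_eq_pvIter (a b : List Int) (t : Nat) :
    (List.range t).foldl
      (fun (p : Nat × Nat) _ => if a.getD p.1 0 ≤ b.getD p.2 0 then (p.1 + 1, p.2) else (p.1, p.2 + 1))
      (0, 0) = pvIter a b t := by
  induction t with
  | zero => rfl
  | succ t ih => rw [List.range_succ, List.foldl_append, ih]; rfl

theorem pvIter_inv (a b : List Int) :
    ∀ t, t < a.length → t < b.length →
      (pvIter a b t).1 + (pvIter a b t).2 = t ∧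
      (pvMerge a b).drop t = pvMerge (a.drop (pvIter a b t).1) (b.drop (pvIter a b t).2) := by
  intro t
  induction t with
  | zero => intro _ _; exact ⟨rfl, by simp [pvIter]⟩
  | succ t ih =>
    intro hta htb
    obtain ⟨hsum, hdrop⟩ := ih (Nat.lt_of_succ_lt hta) (Nat.lt_of_succ_lt htb)
    set p := pvIter a b t with hp
    have hia : p.1 < a.length := by omega
    have hjb : p.2 < b.length := by omega
    have hda : a.drop p.1 = a[p.1] :: a.drop (p.1 + 1) := List.drop_eq_getElem_cons hia
    have hdb : b.drop p.2 = b[p.2] :: b.drop (p.2 + 1) := List.drop_eq_getElem_cons hjb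
    have hga : a.getD p.1 0 = a[p.1] := List.getD_eq_getElem a 0 hia
    have hgb : b.getD p.2 0 = b[p.2] := List.getD_eq_getElem b 0 hjb
    have hstep : pvIter a b (t + 1)
        = if a.getD p.1 0 ≤ b.getD p.2 0 then (p.1 + 1, p.2) else (p.1, p.2 + 1) := rfl
    have hdrop1 : (pvMerge a b).drop (t + 1) = ((pvMerge a b).drop t).drop 1 := by
      rw [List.drop_drop]
    by_cases h : a.getD p.1 0 ≤ b.getD p.2 0
    · rw [hstep, if_pos h]
      refine ⟨by simpa using by omega, ?_⟩
      rw [hdrop1, hdrop, hda, hdb, pvMerge]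
      rw [hga, hgb] at h
      simp [h, ← hdb]
    · rw [hstep, if_neg h]
      refine ⟨by simpa using by omega, ?_⟩
      rw [hdrop1, hdrop, hda, hdb, pvMerge]
      rw [hga, hgb] at h
      simp [h, ← hda]

-- ===== VERDICT (by name: the statement is the Claim_ definition above) =====
theorem get_up_median2_spec : Claim_equal_get_up_median2 := by
  intro arr1 arr2 _
  unfold Spec_get_up_median2
  simp only [get_up_median2, get_up_median2_alt]
  by_cases hguard : arr1 = [] ∨ arr2 = [] ∨ arr1.length ≠ arr2.length
  · simp [hguard]
  · rw [if_neg hguard, if_neg hguard]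
    push Not at hguard
    obtain ⟨h1, h2, hlen⟩ := hguard
    set n := arr1.length with hn
    have hnpos : 0 < n := List.length_pos_of_ne_nil h1
    set a := PySem.List.sorted arr1 (fun x => x) false with hadef
    set b := PySem.List.sorted arr2 (fun x => x) false with hbdef
    have hal : a.length = n := by rw [hadef]; exact PySem.List.length_sorted ..
    have hbl : b.length = n := by rw [hbdef, PySem.List.length_sorted]; omega
    -- A's accumulated data is arr1 ++ arr2
    have hdata : (arr2.foldl (fun acc item => acc ++ [item])
        (arr1.foldl (fun acc item => acc ++ [item]) ([] : List Int))) = arr1 ++ arr2 := by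
      rw [PySem.List.foldl_append_singleton_eq_self, PySem.List.foldl_append_singleton_eq_self]
      simp
    -- A's mid = n - 1 (as an Int)
    have hmid : PySem.Int.truncdiv (((arr1 ++ arr2).length : Nat) : Int) 2 - 1 = (n : Int) - 1 := by
      have : (arr1 ++ arr2).length = 2 * n := by simp [← hlen]; omega
      rw [this]; simp [PySem.Int.truncdiv]
    -- sorted(arr1 ++ arr2) = pvMerge a b
    have hperm : (pvMerge a b).Perm (arr1 ++ arr2) := by
      refine (pvMerge_perm a b).trans (List.Perm.append ?_ ?_)
      · exact PySem.List.sorted_perm ..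
      · exact PySem.List.sorted_perm ..
    have hpw : (pvMerge a b).Pairwise (· ≤ ·) := by
      refine pvMerge_pairwise a b ?_ ?_
      · simpa using PySem.List.sorted_pairwise (xs := arr1) (key := fun x : Int => x)
      · simpa using PySem.List.sorted_pairwise (xs := arr2) (key := fun x : Int => x)
    have hsorted : PySem.List.sorted (arr1 ++ arr2) (fun x => x) false = pvMerge a b :=
      PySem.List.sorted_id_eq_of_perm_of_pairwise _ _ hperm hpw
    -- the loop state after n-1 steps
    rw [foldl_range_eq_pvIter a b (n - 1)]
    obtain ⟨hsum, hdrop⟩ := pvIter_inv a b (n - 1) (by omega) (by omega)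
    set p := pvIter a b (n - 1) with hpdef
    have hia : p.1 < a.length := by omega
    have hjb : p.2 < b.length := by omega
    have hda : a.drop p.1 = a[p.1] :: a.drop (p.1 + 1) := List.drop_eq_getElem_cons hia
    have hdb : b.drop p.2 = b[p.2] :: b.drop (p.2 + 1) := List.drop_eq_getElem_cons hjb
    -- A's indexing reduced to the head of the walked-to suffix
    have hnn : (0 : Int) ≤ (n : Int) - 1 := by omega
    have htn : ((n : Int) - 1).toNat = n - 1 := by omega
    rw [hdata, hmid, hsorted, PySem.List.pyGet?_of_nonneg _ hnn, htn,
        ← List.head?_drop, hdrop, hda, hdb, pvMerge]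
    have hga : a.getD p.1 0 = a[p.1] := List.getD_eq_getElem a 0 hia
    have hgb : b.getD p.2 0 = b[p.2] := List.getD_eq_getElem b 0 hjb
    by_cases h : a[p.1] ≤ b[p.2]
    · simp [h, List.getElem?_eq_getElem hia, List.getElem?_eq_getElem hjb]
    · simp [h, List.getElem?_eq_getElem hia, List.getElem?_eq_getElem hjb,
        min_eq_right (le_of_not_ge h)]
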